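-- pv_equiv track=rewrite | github.com/Mojackhak/LFP-TensorPipe | src/lfptensorpipe/app/localize/paths.py | localize_selected_regions_signature
-- ===== SOURCE A (Python) =====
-- from typing import TYPE_CHECKING, Any
--
-- def localize_selected_regions_signature(value: Any) -> list[str] | None:
--     """Return a stable interested-region signature for Localize atlas config."""
--     if not isinstance(value, list | tuple):
--         return None
--     seen: set[str] = set()
--     out: list[str] = []
--     for raw_name in value:
--         name = str(raw_name).strip()
--         if not name or name in seen:
--             continue
--         seen.add(name)
--         out.append(name)
--     if not out:
--         return None
--     out.sort(key=lambda item: (item.casefold(), item))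
--     return out
-- ===== SOURCE B (Python) =====
-- def localize_selected_regions_signature(value):
--     """Return a stable interested-region signature for Localize atlas config."""
--     if not isinstance(value, (list, tuple)):
--         return None
--     names = sorted((n for n in (str(x).strip() for x in value) if n),
--                    key=lambda s: (s.casefold(), s))
--     out = []
--     for name in names:
--         if not out or out[-1] != name:
--             out.append(name)
--     return out or None
-- ===== Notes on version B (the rewrite author's own statement) =====
-- stated objective: idiomatic
-- what changed: B drops A's 'seen'-set bookkeeping: it normalizes and filters all names, sorts the whole list (duplicates included) by (casefold, name), and deduplicates in a single adjacency pass over the sorted list, relying on equal strings tying under the key.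
import Mathlib
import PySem

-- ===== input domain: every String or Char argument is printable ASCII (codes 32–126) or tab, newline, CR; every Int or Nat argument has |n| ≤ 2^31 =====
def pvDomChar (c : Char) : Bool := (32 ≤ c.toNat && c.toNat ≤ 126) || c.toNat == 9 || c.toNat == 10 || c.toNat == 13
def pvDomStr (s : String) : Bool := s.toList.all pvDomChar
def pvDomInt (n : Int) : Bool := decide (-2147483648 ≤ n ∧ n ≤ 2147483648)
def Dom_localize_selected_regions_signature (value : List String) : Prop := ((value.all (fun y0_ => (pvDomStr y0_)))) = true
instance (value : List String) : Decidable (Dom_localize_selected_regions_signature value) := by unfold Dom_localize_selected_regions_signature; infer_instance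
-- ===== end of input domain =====

-- B replaces A's 'seen'-set dedup-then-sort by sort-everything-then-one-adjacency-pass dedup (same results; no speed claim).
-- Python's str.casefold() is ported as PySem.Str.lower: exact on the ASCII input domain Dom.
-- Under the type convention value : List String, A's isinstance(list|tuple) guard is always satisfied.

-- ===== PORT A =====
def localize_selected_regions_signature (value : List String) : Option (List String) :=
  let p := value.foldl
    (fun (acc : PySem.Set String × List String) raw_name =>
      let name := PySem.Str.strip raw_name
      if name == "" || acc.1.contains name then acc
      else (PySem.Set.add acc.1 name, acc.2 ++ [name]))
    (PySem.Set.empty, [])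
  if p.2 = [] then none
  else some (PySem.List.sorted2 p.2 (fun item => PySem.Str.lower item) (fun item => item))

-- ===== PORT B =====
def localize_selected_regions_signature_alt (value : List String) : Option (List String) :=
  let names := PySem.List.sorted2
      ((value.map PySem.Str.strip).filter (fun n => !(n == "")))
      (fun s => PySem.Str.lower s) (fun s => s)
  let out := names.foldl
    (fun out name => if out = [] ∨ out.getLast? ≠ some name then out ++ [name] else out) []
  if out = [] then none else some out

-- ===== PRECONDITION & SPEC =====
def Spec_localize_selected_regions_signature (value : List String) (out : Option (List String)) : Prop := out = localize_selected_regions_signature_alt value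
instance (value : List String) (out : Option (List String)) : Decidable (Spec_localize_selected_regions_signature value out) := by unfold Spec_localize_selected_regions_signature; infer_instance

-- ===== CLAIM (what is proved, stated in full; the proofs are below) =====
def Claim_equal_localize_selected_regions_signature : Prop := ∀ (value : List String), Dom_localize_selected_regions_signature value → Spec_localize_selected_regions_signature value (localize_selected_regions_signature value)

-- ===== LEMMAS AND PROOFS =====

-- the sort key (s.casefold(), s) as a lexicographic value (proof-side only)
def pvKey (s : String) : Lex (String × String) := toLex (PySem.Str.lower s, s)

lemma pvKey_injective : Function.Injective pvKey := by
  intro a b h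
  have := congrArg (fun x => (ofLex x).2) h
  simpa [pvKey] using this

-- sorted2 with the (casefold, id) tuple key is sorted with the lexicographic key pvKey
lemma sorted2_eq_sorted_pvKey (xs : List String) :
    PySem.List.sorted2 xs (fun s => PySem.Str.lower s) (fun s => s) =
      PySem.List.sorted xs pvKey := by
  have h : (fun (a b : String) => decide (PySem.Str.lower a < PySem.Str.lower b) || (!decide (PySem.Str.lower b < PySem.Str.lower a) && decide (a < b))) = fun a b => decide (pvKey a < pvKey b) := by
    funext a b
    by_cases h1 : PySem.Str.lower a < PySem.Str.lower b
    · simp [pvKey, Prod.Lex.lt_iff, h1]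
    · by_cases h2 : PySem.Str.lower b < PySem.Str.lower a
      · simp [pvKey, Prod.Lex.lt_iff, h1, h2, ne_of_gt h2]
      · have he : PySem.Str.lower a = PySem.Str.lower b := le_antisymm (not_lt.1 h2) (not_lt.1 h1)
        simp [pvKey, Prod.Lex.lt_iff, he]
  simp only [PySem.List.sorted2, PySem.List.sorted, if_neg (by decide : ¬ (false = true))]
  rw [h]

-- A's loop with seen = out (as a set) computes the ordered dedup of the stripped, nonempty names
lemma aFold (value : List String) (s : List String) :
    value.foldl
      (fun (acc : PySem.Set String × List String) raw_name =>
        if PySem.Str.strip raw_name == "" || acc.1.contains (PySem.Str.strip raw_name) then acc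
        else (PySem.Set.add acc.1 (PySem.Str.strip raw_name), acc.2 ++ [PySem.Str.strip raw_name]))
      (s, s)
    = (((value.map PySem.Str.strip).filter (fun n => !(n == ""))).foldl PySem.Set.add s,
       ((value.map PySem.Str.strip).filter (fun n => !(n == ""))).foldl PySem.Set.add s) := by
  induction value generalizing s with
  | nil => simp
  | cons raw t ih =>
    rw [List.foldl_cons, List.map_cons, List.filter_cons]
    set p : PySem.Set String × List String := (s, s) with hp
    by_cases h0 : (PySem.Str.strip raw == "") = true
    · have hstep : (if (PySem.Str.strip raw == "" || p.1.contains (PySem.Str.strip raw)) = true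
            then p else (PySem.Set.add p.1 (PySem.Str.strip raw), p.2 ++ [PySem.Str.strip raw]))
          = (s, s) := by simp [hp, h0]
      rw [hstep, if_neg (by simp [h0] : ¬ ((!(PySem.Str.strip raw == "")) = true))]
      exact ih s
    · by_cases hc : PySem.Set.contains s (PySem.Str.strip raw) = true
      · have hm : PySem.Str.strip raw ∈ s := by simpa [PySem.Set.contains] using hc
        have hadd : PySem.Set.add s (PySem.Str.strip raw) = s := by simp [PySem.Set.add, hm]
        have hstep : (if (PySem.Str.strip raw == "" || p.1.contains (PySem.Str.strip raw)) = true
              then p else (PySem.Set.add p.1 (PySem.Str.strip raw), p.2 ++ [PySem.Str.strip raw]))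
            = (s, s) := by simp [hp, hm]
        rw [hstep, if_pos (by simp [h0] : (!(PySem.Str.strip raw == "")) = true)]
        simp only [List.foldl_cons]
        rw [hadd]
        exact ih s
      · have hm : PySem.Str.strip raw ∉ s := fun hmem => hc (by simpa [PySem.Set.contains] using hmem)
        have hadd : PySem.Set.add s (PySem.Str.strip raw) = s ++ [PySem.Str.strip raw] := by
          simp [PySem.Set.add, hm]
        have hstep : (if (PySem.Str.strip raw == "" || p.1.contains (PySem.Str.strip raw)) = true
              then p else (PySem.Set.add p.1 (PySem.Str.strip raw), p.2 ++ [PySem.Str.strip raw]))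
            = (s ++ [PySem.Str.strip raw], s ++ [PySem.Str.strip raw]) := by
          simp [hp, h0, hm, PySem.Set.add]
        rw [hstep, if_pos (by simp [h0] : (!(PySem.Str.strip raw == "")) = true)]
        simp only [List.foldl_cons]
        rw [hadd]
        exact ih (s ++ [PySem.Str.strip raw])

-- B's adjacency pass, recursively: the elements kept after an already-kept element `a`
def pvG (a : String) : List String → List String
  | [] => []
  | y :: ys => if y = a then pvG a ys else y :: pvG y ys

lemma bFold (names : List String) :
    ∀ (acc : List String) (a : String),
      names.foldl
        (fun out name => if out = [] ∨ out.getLast? ≠ some name then out ++ [name] else out)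
        (acc ++ [a])
      = acc ++ a :: pvG a names := by
  induction names with
  | nil => intro acc a; simp [pvG]
  | cons y ys ih =>
    intro acc a
    simp only [List.foldl_cons, pvG]
    by_cases h : y = a
    · subst h
      rw [if_neg (by simp)]
      simpa using ih acc y
    · rw [if_pos (Or.inr (by simp; exact fun hh => h hh.symm))]
      have := ih (acc ++ [a]) y
      simp only [List.append_assoc, List.cons_append, List.nil_append] at this ⊢
      rw [this]
      simp [h]

lemma bFold_nil (y : String) (ys : List String) :
    (y :: ys).foldl
        (fun out name => if out = [] ∨ out.getLast? ≠ some name then out ++ [name] else out) []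
      = y :: pvG y ys := by
  simp only [List.foldl_cons, List.nil_append]
  simpa using bFold ys [] y

lemma mem_pvG_of_mem {x : String} : ∀ {ys : List String} {a : String}, x ∈ ys → x = a ∨ x ∈ pvG a ys := by
  intro ys
  induction ys with
  | nil => intro a h; simp at h
  | cons y ys ih =>
    intro a h
    rcases List.mem_cons.1 h with h1 | h2
    · subst h1
      by_cases hy : x = a
      · exact Or.inl hy
      · right; simp [pvG, hy]
    · by_cases hy : y = a
      · subst hy
        simpa [pvG] using ih h2
      · rcases ih (a := y) h2 with h3 | h3
        · right; simp [pvG, hy, h3]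
        · right; simp [pvG, hy, h3]

lemma mem_of_mem_pvG {x : String} : ∀ {ys : List String} {a : String}, x ∈ pvG a ys → x ∈ ys := by
  intro ys
  induction ys with
  | nil => intro a h; simp [pvG] at h
  | cons y ys ih =>
    intro a h
    by_cases hy : y = a
    · simp only [pvG, if_pos hy] at h
      exact List.mem_cons_of_mem _ (ih h)
    · simp only [pvG, if_neg hy] at h
      rcases List.mem_cons.1 h with h1 | h2
      · exact h1 ▸ List.mem_cons_self
      · exact List.mem_cons_of_mem _ (ih h2)

lemma pairwise_pvG : ∀ (ys : List String) (a : String),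
    (a :: ys).Pairwise (fun u v => pvKey u ≤ pvKey v) →
    (a :: pvG a ys).Pairwise (fun u v => pvKey u < pvKey v) := by
  intro ys
  induction ys with
  | nil => intro a _; simp [pvG]
  | cons y ys ih =>
    intro a h
    rcases List.pairwise_cons.1 h with ⟨ha, htail⟩
    by_cases hy : y = a
    · subst hy
      simp only [pvG]
      apply ih
      refine List.pairwise_cons.2 ⟨?_, (List.pairwise_cons.1 htail).2⟩
      intro z hz
      exact ha z (List.mem_cons_of_mem _ hz)
    · simp only [pvG, if_neg hy]
      have hyk : (y :: pvG y ys).Pairwise (fun u v => pvKey u < pvKey v) := ih y htail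
      refine List.pairwise_cons.2 ⟨?_, hyk⟩
      have hay : pvKey a < pvKey y := by
        refine lt_of_le_of_ne (ha y List.mem_cons_self) ?_
        intro he
        exact hy ((pvKey_injective he).symm)
      intro z hz
      rcases List.mem_cons.1 hz with h1 | h2
      · exact h1 ▸ hay
      · exact lt_trans hay ((List.pairwise_cons.1 hyk).1 z h2)

-- ===== VERDICT (by name: the statement is the Claim_ definition above) =====
theorem localize_selected_regions_signature_spec : Claim_equal_localize_selected_regions_signature := by
  intro value _
  show localize_selected_regions_signature value = localize_selected_regions_signature_alt value
  show (if (value.foldl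
            (fun (acc : PySem.Set String × List String) raw_name =>
              let name := PySem.Str.strip raw_name
              if name == "" || acc.1.contains name then acc
              else (PySem.Set.add acc.1 name, acc.2 ++ [name]))
            (PySem.Set.empty, [])).2 = []
        then none
        else some (PySem.List.sorted2
          (value.foldl
            (fun (acc : PySem.Set String × List String) raw_name =>
              let name := PySem.Str.strip raw_name
              if name == "" || acc.1.contains name then acc
              else (PySem.Set.add acc.1 name, acc.2 ++ [name]))
            (PySem.Set.empty, [])).2 (fun item => PySem.Str.lower item) (fun item => item)))
      = (if (PySem.List.sorted2 ((value.map PySem.Str.strip).filter (fun n => !(n == "")))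
                (fun s => PySem.Str.lower s) (fun s => s)).foldl
            (fun out name => if out = [] ∨ out.getLast? ≠ some name then out ++ [name] else out) [] = []
        then none
        else some ((PySem.List.sorted2 ((value.map PySem.Str.strip).filter (fun n => !(n == "")))
                (fun s => PySem.Str.lower s) (fun s => s)).foldl
            (fun out name => if out = [] ∨ out.getLast? ≠ some name then out ++ [name] else out) []))
  have h2 : (value.foldl
            (fun (acc : PySem.Set String × List String) raw_name =>
              let name := PySem.Str.strip raw_name
              if name == "" || acc.1.contains name then acc
              else (PySem.Set.add acc.1 name, acc.2 ++ [name]))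
            (PySem.Set.empty, [])).2
      = ((value.map PySem.Str.strip).filter (fun n => !(n == ""))).foldl PySem.Set.add [] :=
    congrArg Prod.snd (aFold value [])
  rw [h2]
  have ht : ((value.map PySem.Str.strip).filter (fun n => !(n == ""))).foldl PySem.Set.add []
      = PySem.List.dedup ((value.map PySem.Str.strip).filter (fun n => !(n == ""))) := by
    rw [PySem.List.dedup_eq_ofList, PySem.Set.ofList_eq_foldl]
  rw [ht]
  simp only [sorted2_eq_sorted_pvKey]
  set norm := (value.map PySem.Str.strip).filter (fun n => !(n == "")) with hnorm
  by_cases hn : norm = []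
  · rw [hn]
    simp [PySem.List.dedup, PySem.Set.ofList, PySem.List.sorted]
  · obtain ⟨y, ys, hs⟩ : ∃ y ys, PySem.List.sorted norm pvKey = y :: ys := by
      rcases h : PySem.List.sorted norm pvKey with _ | ⟨y, ys⟩
      · exact absurd ((PySem.List.sorted_eq_nil_iff norm pvKey false).1 h) hn
      · exact ⟨y, ys, rfl⟩
    rw [hs, bFold_nil]
    have hsort : (y :: ys).Pairwise (fun u v => pvKey u ≤ pvKey v) := by
      rw [← hs]; exact PySem.List.sorted_pairwise norm pvKey
    have hpair : (y :: pvG y ys).Pairwise (fun u v => pvKey u < pvKey v) := pairwise_pvG ys y hsort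
    have hrnodup : (y :: pvG y ys).Nodup :=
      hpair.imp (fun {u v} hlt => fun he => absurd (he ▸ hlt) (lt_irrefl _))
    have hmem : ∀ x, x ∈ (y :: pvG y ys) ↔ x ∈ PySem.List.dedup norm := by
      intro x
      rw [PySem.List.mem_dedup]
      have hms : x ∈ (y :: ys) ↔ x ∈ norm := by
        rw [← hs]; exact PySem.List.mem_sorted norm pvKey false x
      rw [← hms]
      constructor
      · intro h
        rcases List.mem_cons.1 h with h1 | h2
        · exact h1 ▸ List.mem_cons_self
        · exact List.mem_cons_of_mem _ (mem_of_mem_pvG h2)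
      · intro h
        rcases List.mem_cons.1 h with h1 | h2
        · exact h1 ▸ List.mem_cons_self
        · rcases mem_pvG_of_mem (a := y) h2 with h3 | h3
          · exact h3 ▸ List.mem_cons_self
          · exact List.mem_cons_of_mem _ h3
    have hdnodup : (PySem.List.dedup norm).Nodup := PySem.List.nodup_dedup norm
    have hperm : (y :: pvG y ys).Perm (PySem.List.dedup norm) :=
      (List.perm_ext_iff_of_nodup hrnodup hdnodup).2 hmem
    have htne : PySem.List.dedup norm ≠ [] := by
      intro h
      rcases List.exists_mem_of_ne_nil norm hn with ⟨w, hw⟩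
      have := (PySem.List.mem_dedup norm w).2 hw
      rw [h] at this
      simp at this
    rw [if_neg htne, if_neg (by simp : ¬ (y :: pvG y ys = []))]
    exact congrArg some
      (PySem.List.sorted_eq_of_perm_of_pairwise_lt (PySem.List.dedup norm) (y :: pvG y ys) pvKey hperm hpair)
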